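-- pv_equiv track=rewrite | github.com/Sahilraj3107/leetcode | 2054-two-best-non-overlapping-events/2054-two-best-non-overlapping-events.py | maxTwoEvents
-- ===== SOURCE A (Python) =====
-- from typing import List
--
-- def maxTwoEvents(events: List[List[int]]) -> int:
--     n = len(events)
--     events.sort(key=lambda x: x[1])
--     max_val =[0]*n
--
--     max_val[0]=events[0][2]
--
--     for i in range(1,n):
--         max_val[i] = max(max_val[i-1],events[i][2])
--
--     maxsum =0
--     for i in range(n):
--         s,e,v =events[i]
--         maxsum =max(maxsum,v)
--
--
--         l,r =0,i-1
--         idx =-1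
--
--         while l<=r:
--             mid = (l+r)//2
--
--             if events[mid][1]< s:
--                 idx =mid
--                 l =mid +1
--             else:
--                 r =mid -1
--         if idx !=-1:
--             maxsum = max(maxsum, v+max_val[idx])
--
--     return maxsum
-- ===== SOURCE B (Python) =====
-- def maxTwoEvents(events):
--     events.sort(key=lambda x: x[1])
--     best = 0
--     for i in range(len(events)):
--         s, e, v = events[i]
--         best = max(best, v)
--         for j in range(i):
--             if events[j][1] < s:
--                 best = max(best, v + events[j][2])
--     return best
-- ===== Notes on version B (the rewrite author's own statement) =====
-- stated objective: simpler
-- what changed: Replaces A's prefix-max array plus per-event binary search with a plain quadratic scan over the earlier (end-sorted) events, keeping the in-place sort by end time.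
import Mathlib
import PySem

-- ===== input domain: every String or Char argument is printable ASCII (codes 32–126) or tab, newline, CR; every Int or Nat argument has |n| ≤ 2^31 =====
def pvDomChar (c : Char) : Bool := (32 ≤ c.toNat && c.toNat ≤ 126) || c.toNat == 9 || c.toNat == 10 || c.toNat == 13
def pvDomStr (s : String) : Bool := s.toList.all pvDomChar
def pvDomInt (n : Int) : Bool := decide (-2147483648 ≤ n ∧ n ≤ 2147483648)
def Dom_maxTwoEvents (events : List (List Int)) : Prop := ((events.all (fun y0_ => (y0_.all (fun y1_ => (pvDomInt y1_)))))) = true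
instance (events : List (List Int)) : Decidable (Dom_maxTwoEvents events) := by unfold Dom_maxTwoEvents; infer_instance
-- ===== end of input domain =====

-- B replaces A's prefix-max array + per-event binary search with a plain quadratic scan over
-- the earlier end-sorted events (simpler, not faster). Both sort the argument in place in
-- Python; the equivalence proved here is about the return value (the mutation is identical).

-- ===== PORT A =====
-- the while-loop binary search of A (state l, r, idx), as a recursive helper
def bsearchA (es : List (List Int)) (s : Int) (l r idx : Int) : Int :=
  if h : l ≤ r then
    let mid := PySem.Int.floordiv (l + r) 2
    if PySem.List.pyGetD (PySem.List.pyGetD es mid []) 1 0 < s then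
      bsearchA es s (mid + 1) r mid
    else
      bsearchA es s l (mid - 1) idx
  else idx
termination_by (r + 1 - l).toNat
decreasing_by
  · have := PySem.Int.floordiv_two_mid_bounds (lo := l) (hi := r) h
    omega
  · have := PySem.Int.floordiv_two_mid_bounds (lo := l) (hi := r) h
    omega

def maxTwoEvents (events : List (List Int)) : Int :=
  let n : Int := events.length
  let es := PySem.List.sorted events (fun x => PySem.List.pyGetD x 1 0) false
  let maxval : List Int := PySem.List.pyRepeat [0] n
  let maxval := PySem.List.pySetD maxval 0 (PySem.List.pyGetD (PySem.List.pyGetD es 0 []) 2 0)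
  let maxval := (PySem.List.pyRange 1 n 1).foldl (fun mv i =>
      PySem.List.pySetD mv i (max (PySem.List.pyGetD mv (i - 1) 0)
        (PySem.List.pyGetD (PySem.List.pyGetD es i []) 2 0))) maxval
  (PySem.List.pyRange 0 n 1).foldl (fun maxsum i =>
      let ev := PySem.List.pyGetD es i []
      let s := PySem.List.pyGetD ev 0 0
      let v := PySem.List.pyGetD ev 2 0
      let maxsum := max maxsum v
      let idx := bsearchA es s 0 (i - 1) (-1)
      if idx ≠ -1 then max maxsum (v + PySem.List.pyGetD maxval idx 0) else maxsum) 0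

-- ===== PORT B =====
def maxTwoEvents_alt (events : List (List Int)) : Int :=
  let es := PySem.List.sorted events (fun x => PySem.List.pyGetD x 1 0) false
  (PySem.List.pyRange 0 (events.length : Int) 1).foldl (fun best i =>
      let ev := PySem.List.pyGetD es i []
      let s := PySem.List.pyGetD ev 0 0
      let v := PySem.List.pyGetD ev 2 0
      let best := max best v
      (PySem.List.pyRange 0 i 1).foldl (fun best j =>
          if PySem.List.pyGetD (PySem.List.pyGetD es j []) 1 0 < s then
            max best (v + PySem.List.pyGetD (PySem.List.pyGetD es j []) 2 0)
          else best) best) 0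

-- ===== PRECONDITION & SPEC =====
-- Pre_ excludes exactly the inputs where A raises: the empty list (IndexError on max_val[0])
-- and any event whose length is not 3 (IndexError on x[1]/[2] or ValueError on unpacking).
def Pre_maxTwoEvents (events : List (List Int)) : Prop :=
  events ≠ [] ∧ ∀ ev ∈ events, ev.length = 3
instance (events : List (List Int)) : Decidable (Pre_maxTwoEvents events) := by
  unfold Pre_maxTwoEvents; infer_instance
def pvWitness_maxTwoEvents : List (List Int) := [[1, 2, 3], [3, 4, 5]]

def Spec_maxTwoEvents (events : List (List Int)) (out : Int) : Prop := out = maxTwoEvents_alt events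
instance (events : List (List Int)) (out : Int) : Decidable (Spec_maxTwoEvents events out) := by
  unfold Spec_maxTwoEvents; infer_instance

-- ===== CLAIM (what is proved, stated in full; the proofs are below) =====
def Claim_equal_maxTwoEvents : Prop := ∀ (events : List (List Int)), Dom_maxTwoEvents events → Pre_maxTwoEvents events → Spec_maxTwoEvents events (maxTwoEvents events)

-- ===== LEMMAS AND PROOFS =====

-- event field accessors (as the ports read them, with pyGetD defaults)
def eK (ev : List Int) : Int := PySem.List.pyGetD ev 1 0
def sK (ev : List Int) : Int := PySem.List.pyGetD ev 0 0
def vK (ev : List Int) : Int := PySem.List.pyGetD ev 2 0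

-- prefix maximum of the value field over es[0..k]
def pmax (es : List (List Int)) : Nat → Int
  | 0 => vK (es.getD 0 [])
  | k + 1 => max (pmax es k) (vK (es.getD (k + 1) []))

-- number of indices j < i with end time < s
def cntT (es : List (List Int)) (i : Nat) (s : Int) : Nat :=
  (List.range i).countP (fun j => decide (eK (es.getD j []) < s))

theorem mono_aux (es : List (List Int)) (hm : es.Pairwise (fun a b => eK a ≤ eK b))
    (j k : Nat) (hjk : j ≤ k) (hk : k < es.length) :
    eK (es.getD j []) ≤ eK (es.getD k []) := by
  have hj : j < es.length := lt_of_le_of_lt hjk hk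
  rw [List.getD_eq_getElem es [] hj, List.getD_eq_getElem es [] hk]
  rcases lt_or_eq_of_le hjk with h | h
  · exact (List.pairwise_iff_getElem.mp hm) j k hj hk h
  · subst h; exact le_refl _

theorem cntT_le (es : List (List Int)) (i : Nat) (s : Int) : cntT es i s ≤ i := by
  have := List.countP_le_length (l := List.range i) (p := fun j => decide (eK (es.getD j []) < s))
  simpa [cntT] using this

theorem thresh (es : List (List Int)) (hm : es.Pairwise (fun a b => eK a ≤ eK b))
    (s : Int) (i : Nat) (hi : i ≤ es.length) (j : Nat) (hj : j < i) :
    eK (es.getD j []) < s ↔ j < cntT es i s := by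
  constructor
  · intro hp
    have hsplit : i = (j + 1) + (i - (j + 1)) := by omega
    have h1 : cntT es i s = (List.range (j + 1)).countP (fun j => decide (eK (es.getD j []) < s))
        + ((List.range (i - (j + 1))).map (fun k => (j + 1) + k)).countP
            (fun j => decide (eK (es.getD j []) < s)) := by
      conv_lhs => rw [cntT, hsplit]
      rw [List.range_add, List.countP_append]
    have h2 : (List.range (j + 1)).countP (fun j => decide (eK (es.getD j []) < s)) = j + 1 := by
      rw [List.countP_eq_length.mpr, List.length_range]
      intro k hk
      have hk' : k ≤ j := by simpa [Nat.lt_succ_iff] using List.mem_range.mp hk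
      have := mono_aux es hm k j hk' (lt_of_lt_of_le hj hi)
      simpa using lt_of_le_of_lt this hp
    omega
  · intro ht
    by_contra hnp
    push Not at hnp
    have hsplit : i = j + (i - j) := by omega
    have h1 : cntT es i s = (List.range j).countP (fun j => decide (eK (es.getD j []) < s))
        + ((List.range (i - j)).map (fun k => j + k)).countP
            (fun j => decide (eK (es.getD j []) < s)) := by
      conv_lhs => rw [cntT, hsplit]
      rw [List.range_add, List.countP_append]
    have h2 : ((List.range (i - j)).map (fun k => j + k)).countP
        (fun j => decide (eK (es.getD j []) < s)) = 0 := by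
      rw [List.countP_eq_zero]
      intro a ha
      rcases List.mem_map.mp ha with ⟨k, hk, rfl⟩
      have hlt : j + k < i := by have := List.mem_range.mp hk; omega
      have := mono_aux es hm j (j + k) (Nat.le_add_right _ _) (lt_of_lt_of_le hlt hi)
      simp only [decide_eq_true_eq]
      intro hcon
      exact absurd (lt_of_le_of_lt this hcon) (not_lt.mpr hnp)
    have h3 := List.countP_le_length (l := List.range j)
      (p := fun j => decide (eK (es.getD j []) < s))
    simp only [List.length_range] at h3
    omega

theorem bsearch_eq (es : List (List Int)) (hm : es.Pairwise (fun a b => eK a ≤ eK b))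
    (s : Int) (i : Nat) (hi : i ≤ es.length) :
    ∀ fuel : Nat, ∀ l r idx : Int, (r + 1 - l).toNat ≤ fuel → 0 ≤ l → r ≤ (i : Int) - 1 →
      idx = l - 1 → l ≤ (cntT es i s : Int) → (cntT es i s : Int) ≤ r + 1 →
      bsearchA es s l r idx = (cntT es i s : Int) - 1 := by
  intro fuel
  induction fuel with
  | zero =>
    intro l r idx hf h0 hr hidx hl hu
    rw [bsearchA, dif_neg (by omega)]
    omega
  | succ fuel ih =>
    intro l r idx hf h0 hr hidx hl hu
    by_cases hlr : l ≤ r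
    · rw [bsearchA, dif_pos hlr]
      simp only []
      have hmb := PySem.Int.floordiv_two_mid_bounds (lo := l) (hi := r) hlr
      set mid := PySem.Int.floordiv (l + r) 2 with hmiddef
      have hcast : mid = ((mid.toNat : Nat) : Int) := by omega
      have hj : mid.toNat < i := by omega
      have hth := thresh es hm s i hi mid.toNat hj
      have hget : PySem.List.pyGetD es mid [] = es.getD mid.toNat [] := by
        rw [hcast, PySem.List.pyGetD_natCast]
        have hmm : (max mid 0).toNat = mid.toNat := by omega
        simp [hmm]
      by_cases hc : PySem.List.pyGetD (PySem.List.pyGetD es mid []) 1 0 < s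
      · rw [if_pos hc]
        have hlt : mid.toNat < cntT es i s := hth.mp (by rw [hget] at hc; exact hc)
        exact ih (mid + 1) r mid (by omega) (by omega) hr (by omega) (by omega) hu
      · rw [if_neg hc]
        have hge : ¬ mid.toNat < cntT es i s := fun h => hc (by rw [hget]; exact hth.mpr h)
        exact ih l (mid - 1) idx (by omega) h0 (by omega) hidx hl (by omega)
    · rw [bsearchA, dif_neg hlr]
      omega

theorem mv_inv (es : List (List Int)) (N : Nat) (hN : N = es.length) :
    ∀ m : Nat, 1 ≤ m → m ≤ N →
      ((PySem.List.pyRange 1 (m : Int) 1).foldl (fun mv i =>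
          PySem.List.pySetD mv i (max (PySem.List.pyGetD mv (i - 1) 0)
            (PySem.List.pyGetD (PySem.List.pyGetD es i []) 2 0)))
        (PySem.List.pySetD (PySem.List.pyRepeat [0] (N : Int)) 0
          (PySem.List.pyGetD (PySem.List.pyGetD es 0 []) 2 0))).length = N ∧
      ∀ k : Nat, k < N →
        ((PySem.List.pyRange 1 (m : Int) 1).foldl (fun mv i =>
            PySem.List.pySetD mv i (max (PySem.List.pyGetD mv (i - 1) 0)
              (PySem.List.pyGetD (PySem.List.pyGetD es i []) 2 0)))
          (PySem.List.pySetD (PySem.List.pyRepeat [0] (N : Int)) 0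
            (PySem.List.pyGetD (PySem.List.pyGetD es 0 []) 2 0))).getD k 0 =
          if k < m then pmax es k else 0 := by
  have hbase : (PySem.List.pySetD (PySem.List.pyRepeat [0] (N : Int)) 0
      (PySem.List.pyGetD (PySem.List.pyGetD es 0 []) 2 0)) = (List.replicate N (0 : Int)).set 0 (pmax es 0) := by
    simp [pysem, pmax, vK]
  intro m
  induction m with
  | zero => omega
  | succ m ih =>
    intro _ hmN
    rcases Nat.eq_zero_or_pos m with rfl | hm
    · have hrange : PySem.List.pyRange 1 ((0 + 1 : Nat) : Int) 1 = [] := by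
        simp [PySem.List.pyRange_one_eq_nil]
      rw [hrange]
      simp only [List.foldl_nil]
      rw [hbase]
      refine ⟨by simp, ?_⟩
      intro k hk
      rw [List.getD_eq_getElem _ _ (by simpa using hk)]
      rcases Nat.eq_zero_or_pos k with rfl | hkpos
      · simp
      · simp [Nat.pos_iff_ne_zero.mp hkpos |> Ne.symm]
        omega
    · obtain ⟨ihlen, ihget⟩ := ih hm (by omega)
      have hrange : PySem.List.pyRange 1 ((m + 1 : Nat) : Int) 1 =
          PySem.List.pyRange 1 (m : Int) 1 ++ [(m : Int)] := by
        push_cast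
        exact PySem.List.pyRange_one_succ_right (by exact_mod_cast hm)
      rw [hrange, List.foldl_append]
      set L := (PySem.List.pyRange 1 (m : Int) 1).foldl (fun mv i =>
          PySem.List.pySetD mv i (max (PySem.List.pyGetD mv (i - 1) 0)
            (PySem.List.pyGetD (PySem.List.pyGetD es i []) 2 0)))
        (PySem.List.pySetD (PySem.List.pyRepeat [0] (N : Int)) 0
          (PySem.List.pyGetD (PySem.List.pyGetD es 0 []) 2 0)) with hLdef
      simp only [List.foldl_cons, List.foldl_nil]
      have hm1cast : (m : Int) - 1 = ((m - 1 : Nat) : Int) := by omega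
      have hread : PySem.List.pyGetD L ((m : Int) - 1) 0 = pmax es (m - 1) := by
        rw [hm1cast, PySem.List.pyGetD_natCast]
        have := ihget (m - 1) (by omega)
        rw [if_pos (by omega)] at this
        exact this
      have hes : PySem.List.pyGetD (PySem.List.pyGetD es (m : Int) []) 2 0 = vK (es.getD m []) := by
        rw [PySem.List.pyGetD_natCast]; rfl
      have hval : max (PySem.List.pyGetD L ((m : Int) - 1) 0)
          (PySem.List.pyGetD (PySem.List.pyGetD es (m : Int) []) 2 0) = pmax es m := by
        rw [hread, hes]
        have hmeq : m = (m - 1) + 1 := by omega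
        rw [hmeq, pmax, ← hmeq]
      rw [PySem.List.pySetD_natCast, hval]
      refine ⟨by simpa using ihlen, ?_⟩
      intro k hk
      rw [List.getD_eq_getElem _ _ (by simp [ihlen]; omega)]
      rw [List.getElem_set]
      by_cases hkm : m = k
      · subst hkm
        simp
      · rw [if_neg hkm]
        have := ihget k hk
        rw [← List.getD_eq_getElem _ _ (by omega)] at *
        rw [this]
        by_cases h1 : k < m
        · rw [if_pos h1, if_pos (by omega)]
        · rw [if_neg h1, if_neg (by omega)]

theorem foldthr (es : List (List Int)) (v : Int) (t : Nat) :
    ∀ i : Nat, ∀ init : Int,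
      (List.range i).foldl (fun b k => if k < t then max b (v + vK (es.getD k [])) else b) init =
        if min t i = 0 then init else max init (v + pmax es (min t i - 1)) := by
  intro i
  induction i with
  | zero => simp
  | succ i ihi =>
    intro init
    rw [List.range_succ, List.foldl_append, ihi init]
    simp only [List.foldl_cons, List.foldl_nil]
    by_cases hit : i < t
    · rw [if_pos hit]
      have hmin1 : min t (i + 1) = i + 1 := by omega
      rcases Nat.eq_zero_or_pos i with rfl | hi1
      · have h0 : min t 0 = 0 := by omega
        rw [h0, if_pos rfl, hmin1, if_neg (by omega)]
        rfl
      · have hmin0 : min t i = i := by omega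
        rw [if_neg (by omega), hmin0, hmin1]
        have hieq : i = (i - 1) + 1 := by omega
        have hpm : pmax es i = max (pmax es (i - 1)) (vK (es.getD i [])) := by
          rw [hieq, pmax, ← hieq]
        simp only [Nat.add_sub_cancel]
        rw [hpm]
        rcases le_total (pmax es (i - 1)) (vK (es.getD i [])) with h | h <;>
          rcases le_total init (v + pmax es (i - 1)) with h2 | h2 <;>
          simp [max_def] <;> omega
    · rw [if_neg hit]
      have : min t (i + 1) = min t i := by omega
      rw [this]

theorem inner_eq (es : List (List Int)) (hm : es.Pairwise (fun a b => eK a ≤ eK b))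
    (s v : Int) (i : Nat) (hi : i ≤ es.length) (init : Int) :
    (PySem.List.pyRange 0 (i : Int) 1).foldl (fun b j =>
        if PySem.List.pyGetD (PySem.List.pyGetD es j []) 1 0 < s then
          max b (v + PySem.List.pyGetD (PySem.List.pyGetD es j []) 2 0)
        else b) init =
      if cntT es i s = 0 then init else max init (v + pmax es (cntT es i s - 1)) := by
  have htle := cntT_le es i s
  set t := cntT es i s with htdef
  rw [PySem.List.pyRange_one, List.foldl_map]
  have hcongr : ∀ (b : Int), ∀ k ∈ List.range (((i : Int) - 0).toNat),
      (fun b (k : Nat) =>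
        if PySem.List.pyGetD (PySem.List.pyGetD es ((0 : Int) + ↑k) []) 1 0 < s then
          max b (v + PySem.List.pyGetD (PySem.List.pyGetD es ((0 : Int) + ↑k) []) 2 0)
        else b) b k =
      (fun b (k : Nat) => if k < t then max b (v + vK (es.getD k [])) else b) b k := by
    intro b k hk
    have hki : k < i := by simpa using List.mem_range.mp hk
    have hth := thresh es hm s i hi k hki
    simp only [zero_add, PySem.List.pyGetD_natCast]
    rw [if_congr (by exact hth) rfl rfl]
    rfl
  rw [PySem.List.foldl_congr_mem _ _ _ _ hcongr]
  have : ((i : Int) - 0).toNat = i := by omega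
  rw [this, foldthr es v t i init]
  have : min t i = t := by omega
  rw [this]

-- ===== VERDICT (by name: the statement is the Claim_ definition above) =====
theorem maxTwoEvents_spec : Claim_equal_maxTwoEvents := by
  intro events _ hpre
  unfold Spec_maxTwoEvents maxTwoEvents maxTwoEvents_alt
  simp only []
  refine PySem.List.foldl_congr_mem _ _ _ _ ?_
  intro acc x hx
  obtain ⟨hx0, hxN⟩ := PySem.List.mem_pyRange_one.mp hx
  have hm : (PySem.List.sorted events (fun x => PySem.List.pyGetD x 1 0) false).Pairwise
      (fun a b => eK a ≤ eK b) :=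
    PySem.List.sorted_pairwise events (fun x => PySem.List.pyGetD x 1 0)
  set es := PySem.List.sorted events (fun x => PySem.List.pyGetD x 1 0) false with hesdef
  have hlen : events.length = es.length := (PySem.List.length_sorted events _ false).symm
  have hN1 : 1 ≤ events.length := by
    cases events with
    | nil => exact absurd rfl hpre.1
    | cons a l => simp
  have hxcast : x = ((x.toNat : Nat) : Int) := by omega
  set i := x.toNat with hidef
  have hiN : i < events.length := by omega
  have hies : i ≤ es.length := by omega
  have hevget : PySem.List.pyGetD es x [] = es.getD i [] := by
    rw [hxcast, PySem.List.pyGetD_natCast]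
  set s := PySem.List.pyGetD (PySem.List.pyGetD es x []) 0 0 with hsdef
  set v := PySem.List.pyGetD (PySem.List.pyGetD es x []) 2 0 with hvdef
  have htle := cntT_le es i s
  set t := cntT es i s with htdef
  -- the binary search finds t - 1
  have hbs : bsearchA es s 0 (x - 1) (-1) = (t : Int) - 1 := by
    refine bsearch_eq es hm s i hies ((x - 1 + 1 - 0).toNat) 0 (x - 1) (-1) (le_refl _)
      (le_refl 0) (by omega) (by norm_num) (by omega) (by omega)
  rw [hbs]
  -- the B side inner loop
  have hinner := inner_eq es hm s v i hies (max acc v)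
  rw [← htdef] at hinner
  rw [hxcast, hinner]
  by_cases ht0 : t = 0
  · rw [if_neg (by omega), if_pos (by exact_mod_cast ht0)]
  · rw [if_pos (by omega), if_neg ht0]
    -- the prefix-max array read
    obtain ⟨mvlen, mvget⟩ := mv_inv es events.length hlen events.length hN1 (le_refl _)
    have hcast2 : (t : Int) - 1 = (((t - 1 : Nat) : Nat) : Int) := by omega
    rw [hcast2, PySem.List.pyGetD_natCast]
    have hrd := mvget (t - 1) (by omega)
    rw [if_pos (by omega)] at hrd
    rw [hrd]
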